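-- pv_equiv track=rewrite | github.com/project-you-apps/SAGE | arc-agi-3/experiments/arc_perception.py | color_effectiveness_summary
-- ===== SOURCE A (Python) =====
-- COLOR_NAMES = {
--     0: "black", 1: "blue", 2: "red", 3: "green", 4: "yellow",
--     5: "gray", 6: "magenta", 7: "orange", 8: "cyan", 9: "brown",
--     10: "pink", 11: "maroon", 12: "olive", 13: "navy", 14: "teal",
--     15: "white",
-- }
--
-- def color_name(c):
--     """Human-readable color name."""
--     return COLOR_NAMES.get(int(c), f"color{c}")
--
-- def color_effectiveness_summary(color_tries, color_changes):
--     """Format color effectiveness learning for LLM.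
--
--     Args:
--         color_tries: dict {color: num_tries}
--         color_changes: dict {color: num_changes}
--
--     Returns:
--         Text summary of which colors cause grid changes.
--     """
--     if not color_tries:
--         return "No color effectiveness data yet."
--
--     lines = []
--     effective = []  # >30% rate
--     neutral = []    # 1-30% rate
--     ineffective = []  # 0% rate
--
--     for color in sorted(color_tries.keys()):
--         tries = color_tries[color]
--         changes = color_changes.get(color, 0)
--         rate = changes / max(tries, 1)
--
--         entry = f"{color_name(color)}({changes}/{tries}={rate:.0%})"
--         if rate > 0.3:
--             effective.append(entry)
--         elif rate > 0:
--             neutral.append(entry)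
--         else:
--             ineffective.append(entry)
--
--     if effective:
--         lines.append(f"Effective colors (click causes change): {', '.join(effective)}")
--     if neutral:
--         lines.append(f"Sometimes effective: {', '.join(neutral)}")
--     if ineffective:
--         lines.append(f"Ineffective (no change): {', '.join(ineffective)}")
--
--     return "\n".join(lines) if lines else "All colors untested."
-- ===== SOURCE B (Python) =====
-- _NAMES = ["black", "blue", "red", "green", "yellow", "gray", "magenta", "orange",
--           "cyan", "brown", "pink", "maroon", "olive", "navy", "teal", "white"]
--
-- def color_name(c):
--     c = int(c)
--     return _NAMES[c] if 0 <= c < len(_NAMES) else f"color{c}"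
--
-- def color_effectiveness_summary(color_tries, color_changes):
--     if not color_tries:
--         return "No color effectiveness data yet."
--     rows = []
--     for color in sorted(color_tries):
--         tries = color_tries[color]
--         changes = color_changes.get(color, 0)
--         rate = changes / max(tries, 1)
--         rows.append((rate, f"{color_name(color)}({changes}/{tries}={rate:.0%})"))
--     sections = [
--         ("Effective colors (click causes change): ", lambda r: r > 0.3),
--         ("Sometimes effective: ", lambda r: 0 < r <= 0.3),
--         ("Ineffective (no change): ", lambda r: not r > 0),
--     ]
--     lines = [label + ", ".join(e for r, e in rows if pred(r))
--              for label, pred in sections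
--              if any(pred(r) for r, _ in rows)]
--     return "\n".join(lines)
-- ===== Notes on version B (the rewrite author's own statement) =====
-- stated objective: alternative
-- what changed: A classifies colors into three mutating accumulator lists inside one loop, looks names up in a dict, and assembles lines with an if-chain plus an unreachable 'All colors untested.' fallback; B builds one (rate, entry) row table over the sorted colors with a list-indexed color_name, then derives each labeled line from a (label, predicate) section table via filtering passes, dropping the dead fallback.
import Mathlib
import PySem

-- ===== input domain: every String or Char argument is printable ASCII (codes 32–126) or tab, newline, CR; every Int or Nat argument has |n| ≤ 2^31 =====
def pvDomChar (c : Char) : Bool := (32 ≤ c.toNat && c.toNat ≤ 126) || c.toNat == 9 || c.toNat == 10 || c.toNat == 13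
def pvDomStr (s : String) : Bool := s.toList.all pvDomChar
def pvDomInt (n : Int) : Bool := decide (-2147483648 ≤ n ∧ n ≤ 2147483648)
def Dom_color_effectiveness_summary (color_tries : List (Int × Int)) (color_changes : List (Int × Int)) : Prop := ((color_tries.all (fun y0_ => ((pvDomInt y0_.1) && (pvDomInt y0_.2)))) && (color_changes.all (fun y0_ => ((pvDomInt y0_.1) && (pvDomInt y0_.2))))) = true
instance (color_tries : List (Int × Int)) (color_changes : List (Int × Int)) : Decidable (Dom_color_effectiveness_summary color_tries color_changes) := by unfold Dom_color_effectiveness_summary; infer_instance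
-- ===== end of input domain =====

-- B rebuilds the same text table-driven — one (rate, entry) row table over the sorted colors,
-- then per-section filters from a (label, predicate) table — instead of A's three mutating
-- accumulators and if-chain; same cost, different decomposition (objective: alternative).
--
-- FLOAT SEMANTICS: Python computes rate = changes / max(tries, 1) as an IEEE-754 double,
-- compares it with the double literal 0.3, and formats f"{rate:.0%}" (multiply by 100 as a
-- double, render with 0 decimals, round-half-even).  Doubles of int quotients are dyadic
-- rationals, so this is EXACT on |int| ≤ 2^31 inputs (no overflow/subnormals).  Each port
-- models it with its own machinery: A with (mantissa, exponent) integer pairs mirroring the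
-- bit-level rounding, B with correctly rounded rational numbers (round-to-nearest-even at
-- 53 significant bits); division and formatting of a negative double are sign-symmetric,
-- which both ports use to work on |changes|.

-- ===== PORT A =====

-- number of bits of n (Python int.bit_length)
def pvBitLen (n : Nat) : Nat := if n = 0 then 0 else Nat.log2 n + 1

-- round q + r/d (0 ≤ r < d) to the nearest integer, ties to even
def pvRHE (q r d : Nat) : Nat :=
  if d < 2 * r then q + 1 else if 2 * r < d then q else if q % 2 = 0 then q else q + 1

-- the IEEE double nearest to a/b (a ≥ 0, b > 0), as (mantissa, binary exponent): value = m·2^e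
def pvDivDouble (a b : Nat) : Nat × Int :=
  if a = 0 then (0, 0) else
  let f0 : Int := (pvBitLen a : Int) - (pvBitLen b : Int)
  let f : Int :=
    if 0 ≤ f0 then (if a < b <<< f0.toNat then f0 - 1 else f0)
    else (if a <<< (-f0).toNat < b then f0 - 1 else f0)
  let s : Int := 52 - f
  let N : Nat := if 0 ≤ s then a <<< s.toNat else a
  let D : Nat := if 0 ≤ s then b else b <<< (-s).toNat
  (pvRHE (N / D) (N % D) D, f - 52)

-- the IEEE double nearest to 100·(m·2^e)
def pvMul100 (m : Nat) (e : Int) : Nat × Int :=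
  let M := 100 * m
  let l := pvBitLen M
  if l ≤ 53 then (M, e) else
  let drop := l - 53
  (pvRHE (M >>> drop) (M % 2 ^ drop) (2 ^ drop), e + drop)

-- round the exact value m·2^e to the nearest integer, ties to even ('%.0f' of a double)
def pvFmt0 (m : Nat) (e : Int) : Nat :=
  if 0 ≤ e then m <<< e.toNat
  else pvRHE (m >>> (-e).toNat) (m % 2 ^ (-e).toNat) (2 ^ (-e).toNat)

-- double comparison (sign, m·2^e) > 0.3, where double 0.3 = 5404319552844595·2^-54
def pvGt03 (sign : Bool) (m : Nat) (e : Int) : Bool :=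
  if sign then false
  else if -54 ≤ e then decide (5404319552844595 < m <<< (e + 54).toNat)
  else decide (5404319552844595 <<< (-54 - e).toNat < m)

-- rate = changes / max(tries, 1) as a double: (rate > 0.3, rate > 0, f"{rate:.0%}")
def pvRateInfo (changes tries : Int) : Bool × Bool × String :=
  let t : Nat := (max tries 1).toNat
  let sign : Bool := changes < 0
  let me := pvDivDouble changes.natAbs t
  let pe := pvMul100 me.1 me.2
  (pvGt03 sign me.1 me.2, !sign && decide (0 < me.1),
   (if sign then "-" else "") ++ PySem.Int.toStr (pvFmt0 pe.1 pe.2) ++ "%")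

-- COLOR_NAMES / color_name of A's module (a dict with .get)
def pvColorNames : PySem.Dict Int String := PySem.Dict.ofList
  [(0, "black"), (1, "blue"), (2, "red"), (3, "green"), (4, "yellow"),
   (5, "gray"), (6, "magenta"), (7, "orange"), (8, "cyan"), (9, "brown"),
   (10, "pink"), (11, "maroon"), (12, "olive"), (13, "navy"), (14, "teal"),
   (15, "white")]

def pvColorName (c : Int) : String := (pvColorNames.get? c).getD ("color" ++ PySem.Int.toStr c)

def color_effectiveness_summary (color_tries : List (Int × Int)) (color_changes : List (Int × Int)) : String :=
  let ct := PySem.Dict.ofList color_tries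
  let cc := PySem.Dict.ofList color_changes
  if ct.items.isEmpty then "No color effectiveness data yet." else
  let acc :=
    (PySem.List.sorted ct.keys (fun x => x) false).foldl
      (fun (acc : List String × List String × List String) color =>
        let tries := ct.getD color 0
        let changes := cc.getD color 0
        let r := pvRateInfo changes tries
        let entry := pvColorName color ++ "(" ++ PySem.Int.toStr changes ++ "/" ++
                     PySem.Int.toStr tries ++ "=" ++ r.2.2 ++ ")"
        if r.1 then (acc.1 ++ [entry], acc.2.1, acc.2.2)
        else if r.2.1 then (acc.1, acc.2.1 ++ [entry], acc.2.2)
        else (acc.1, acc.2.1, acc.2.2 ++ [entry]))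
      ([], [], [])
  let lines : List String := []
  let lines := if acc.1.isEmpty then lines else
    lines ++ ["Effective colors (click causes change): " ++ PySem.Str.join ", " acc.1]
  let lines := if acc.2.1.isEmpty then lines else
    lines ++ ["Sometimes effective: " ++ PySem.Str.join ", " acc.2.1]
  let lines := if acc.2.2.isEmpty then lines else
    lines ++ ["Ineffective (no change): " ++ PySem.Str.join ", " acc.2.2]
  if lines.isEmpty then "All colors untested." else PySem.Str.join "\n" lines

-- ===== PORT B =====

-- B's float model: correctly rounded rationals.
-- round a rational to the nearest integer, ties to even (IEEE round-half-even)
def rheQ (x : ℚ) : ℤ :=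
  let f := ⌊x⌋
  if (1:ℚ)/2 < x - f then f + 1 else if x - f < 1/2 then f else if f % 2 = 0 then f else f + 1

-- round a nonnegative rational to 53 significant bits: the value of the nearest IEEE double
def dblRoundQ (x : ℚ) : ℚ :=
  if x = 0 then 0 else
  let k : ℤ := Int.log 2 x
  (rheQ (x * 2 ^ (52 - k)) : ℚ) * 2 ^ (k - 52)

-- the value of the double literal 0.3
def pvC03 : ℚ := 5404319552844595 / 2 ^ 54

-- signed rate changes/max(tries,1) as a double value, and its f"{rate:.0%}" rendering
def pvRateQ (changes tries : Int) : ℚ × String :=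
  let mag := dblRoundQ ((changes.natAbs : ℚ) / ((max tries 1).toNat : ℚ))
  ((if changes < 0 then -mag else mag),
   (if changes < 0 then "-" else "") ++ PySem.Int.toStr (rheQ (dblRoundQ (100 * mag))) ++ "%")

-- _NAMES / color_name of Source B (a list indexed by the color when in range)
def pvNamesB : List String :=
  ["black", "blue", "red", "green", "yellow", "gray", "magenta", "orange",
   "cyan", "brown", "pink", "maroon", "olive", "navy", "teal", "white"]

-- Source B guards 0 <= c < len(_NAMES) before indexing, so plain getD is exact here
def pvColorNameB (c : Int) : String :=
  if 0 ≤ c ∧ c < (pvNamesB.length : Int) then pvNamesB.getD c.toNat ""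
  else "color" ++ PySem.Int.toStr c

-- one row of B's table: (rate as a rational double value, formatted entry)
def pvRowB (ct cc : PySem.Dict Int Int) (color : Int) : ℚ × String :=
  let tries := ct.getD color 0
  let changes := cc.getD color 0
  let r := pvRateQ changes tries
  (r.1, pvColorNameB color ++ "(" ++ PySem.Int.toStr changes ++ "/" ++
        PySem.Int.toStr tries ++ "=" ++ r.2 ++ ")")

-- Source B's section table: label and rate predicate (r > 0.3 / 0 < r <= 0.3 / not r > 0)
def pvSectionsB : List (String × (ℚ × String → Bool)) :=
  [("Effective colors (click causes change): ", fun r => decide (pvC03 < r.1)),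
   ("Sometimes effective: ", fun r => decide (0 < r.1) && decide (r.1 ≤ pvC03)),
   ("Ineffective (no change): ", fun r => !decide (0 < r.1))]

def color_effectiveness_summary_alt (color_tries : List (Int × Int)) (color_changes : List (Int × Int)) : String :=
  let ct := PySem.Dict.ofList color_tries
  let cc := PySem.Dict.ofList color_changes
  if ct.items.isEmpty then "No color effectiveness data yet." else
  let rows := (PySem.List.sorted ct.keys (fun x => x) false).map (pvRowB ct cc)
  let lines := pvSectionsB.filterMap (fun sec =>
    if (rows.filter sec.2).isEmpty then none
    else some (sec.1 ++ PySem.Str.join ", " ((rows.filter sec.2).map (·.2))))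
  PySem.Str.join "\n" lines

-- ===== PRECONDITION & SPEC =====
def Spec_color_effectiveness_summary (color_tries : List (Int × Int)) (color_changes : List (Int × Int)) (out : String) : Prop := out = color_effectiveness_summary_alt color_tries color_changes
instance (color_tries : List (Int × Int)) (color_changes : List (Int × Int)) (out : String) : Decidable (Spec_color_effectiveness_summary color_tries color_changes out) := by unfold Spec_color_effectiveness_summary; infer_instance

-- ===== CLAIM (what is proved, stated in full; the proofs are below) =====
def Claim_equal_color_effectiveness_summary : Prop := ∀ (color_tries : List (Int × Int)) (color_changes : List (Int × Int)), Dom_color_effectiveness_summary color_tries color_changes → Spec_color_effectiveness_summary color_tries color_changes (color_effectiveness_summary color_tries color_changes)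

-- ===== LEMMAS AND PROOFS =====

-- rounding a rational N/D half-even agrees with the integer-arithmetic rounding pvRHE
theorem pv_rheQ_div (N D : Nat) (hD : 0 < D) :
    rheQ ((N : ℚ) / D) = (pvRHE (N / D) (N % D) D : ℤ) := by
  have hD0 : (0:ℚ) < (D:ℚ) := by exact_mod_cast hD
  have hmod : N % D < D := Nat.mod_lt _ hD
  have hx : (N:ℚ)/D = ((N/D : ℕ) : ℚ) + ((N % D : ℕ) : ℚ)/(D:ℚ) := by
    field_simp
    exact_mod_cast (Nat.div_add_mod N D).symm
  have hfr0 : (0:ℚ) ≤ ((N % D : ℕ) : ℚ)/(D:ℚ) := by positivity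
  have hfr1 : ((N % D : ℕ) : ℚ)/(D:ℚ) < 1 := by
    rw [div_lt_one hD0]; exact_mod_cast hmod
  have hfl : ⌊(N:ℚ)/D⌋ = ((N/D : ℕ) : ℤ) := by
    rw [hx, Int.floor_eq_iff]
    simp only [Int.cast_natCast]
    constructor
    · linarith
    · linarith
  have hsub : (N:ℚ)/D - (((N/D : ℕ) : ℤ) : ℚ) = ((N % D : ℕ) : ℚ)/(D:ℚ) := by
    rw [hx]; simp only [Int.cast_natCast]; ring
  have hlt1 : ((1:ℚ)/2 < ((N % D : ℕ) : ℚ)/(D:ℚ)) ↔ D < 2 * (N % D) := by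
    rw [div_lt_div_iff₀ (by norm_num) hD0, one_mul]
    constructor
    · intro h
      have h' : ((D:ℕ):ℚ) < ((2 * (N % D) : ℕ) : ℚ) := by push_cast; linarith
      exact_mod_cast h'
    · intro h
      have h' : ((D:ℕ):ℚ) < ((2 * (N % D) : ℕ):ℚ) := by exact_mod_cast h
      push_cast at h'; linarith
  have hlt2 : (((N % D : ℕ) : ℚ)/(D:ℚ) < 1/2) ↔ 2 * (N % D) < D := by
    rw [div_lt_div_iff₀ hD0 (by norm_num)]
    constructor
    · intro h
      have h' : ((2 * (N % D) : ℕ) : ℚ) < ((D:ℕ):ℚ) := by push_cast; linarith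
      exact_mod_cast h'
    · intro h
      have h' : ((2 * (N % D) : ℕ):ℚ) < ((D:ℕ):ℚ) := by exact_mod_cast h
      push_cast at h'; linarith
  unfold rheQ pvRHE
  simp only [hfl, hsub]
  by_cases h1 : D < 2 * (N % D)
  · rw [if_pos (hlt1.mpr h1), if_pos h1]; push_cast; ring
  · rw [if_neg (fun hc => h1 (hlt1.mp hc)), if_neg h1]
    by_cases h2 : 2 * (N % D) < D
    · rw [if_pos (hlt2.mpr h2), if_pos h2]
    · rw [if_neg (fun hc => h2 (hlt2.mp hc)), if_neg h2]
      by_cases h3 : N / D % 2 = 0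
      · rw [if_pos (by omega : ((N/D : ℕ) : ℤ) % 2 = 0), if_pos h3]
      · rw [if_neg (by omega : ¬ ((N/D : ℕ) : ℤ) % 2 = 0), if_neg h3]
        push_cast; ring

theorem pv_rheQ_intCast (n : ℤ) : rheQ (n : ℚ) = n := by
  unfold rheQ
  norm_num

-- bit-length bounds
theorem pv_bitLen_bounds (n : Nat) (hn : n ≠ 0) :
    2 ^ (pvBitLen n - 1) ≤ n ∧ n < 2 ^ pvBitLen n ∧ 1 ≤ pvBitLen n := by
  unfold pvBitLen
  rw [if_neg hn]
  refine ⟨?_, ?_, by omega⟩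
  · simpa using Nat.log2_self_le hn
  · exact Nat.lt_log2_self

-- Int.log determined by a power sandwich
theorem pv_log_eq (x : ℚ) (f : ℤ) (hx : 0 < x) (h1 : (2:ℚ) ^ f ≤ x) (h2 : x < (2:ℚ) ^ (f + 1)) :
    Int.log 2 x = f := by
  have hl1 : ((2:ℕ):ℚ) ^ Int.log 2 x ≤ x := Int.zpow_log_le_self (by norm_num) hx
  have hl2 : x < ((2:ℕ):ℚ) ^ (Int.log 2 x + 1) := Int.lt_zpow_succ_log_self (by norm_num) x
  push_cast at hl1 hl2
  have ha : (2:ℚ) ^ Int.log 2 x < (2:ℚ) ^ (f + 1) := lt_of_le_of_lt hl1 h2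
  have hb : (2:ℚ) ^ f < (2:ℚ) ^ (Int.log 2 x + 1) := lt_of_le_of_lt h1 hl2
  rw [zpow_lt_zpow_iff_right₀ (by norm_num : (1:ℚ) < 2)] at ha hb
  omega

theorem pv_npow_cast (k : ℕ) : ((2 ^ k : ℕ) : ℚ) = (2:ℚ) ^ (k:ℤ) := by
  rw [zpow_natCast]; push_cast; rfl

-- the mantissa/exponent assembly step shared by pv_divDouble_val's branches
theorem pv_core (a b N D : Nat) (f : Int) (ha : a ≠ 0) (hb : 0 < b) (hD : 0 < D)
    (hND : ((N:ℚ))/D = ((a:ℚ)/b) * 2 ^ ((52:ℤ) - f))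
    (hlog : Int.log 2 ((a:ℚ)/b) = f) :
    ((pvRHE (N / D) (N % D) D : ℕ) : ℚ) * 2 ^ (f - 52) = dblRoundQ ((a:ℚ)/b) := by
  have ha0 : (0:ℚ) < a := by exact_mod_cast Nat.pos_of_ne_zero ha
  have hb0 : (0:ℚ) < b := by exact_mod_cast hb
  have hx0 : (a:ℚ)/b ≠ 0 := ne_of_gt (by positivity)
  unfold dblRoundQ
  rw [if_neg hx0]
  simp only [hlog]
  congr 1
  rw [← hND, pv_rheQ_div N D hD]
  push_cast
  rfl

-- the shifted numerator/denominator pair represents (a/b)·2^(52-f)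
theorem pv_shift_val (a b : Nat) (f : Int) (hb : 0 < b) :
    (((if 0 ≤ 52 - f then a <<< (52 - f).toNat else a : ℕ)):ℚ) /
      (((if 0 ≤ 52 - f then b else b <<< (-(52 - f)).toNat : ℕ)):ℚ)
    = ((a:ℚ)/b) * 2 ^ ((52:ℤ) - f) := by
  have hb0 : (0:ℚ) < b := by exact_mod_cast hb
  by_cases hs : 0 ≤ 52 - f
  · rw [if_pos hs, if_pos hs, Nat.shiftLeft_eq]
    push_cast
    rw [show (2:ℚ) ^ ((52 - f).toNat) = (2:ℚ) ^ ((52:ℤ) - f) by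
      rw [← zpow_natCast, Int.toNat_of_nonneg hs]]
    ring
  · rw [if_neg hs, if_neg hs, Nat.shiftLeft_eq]
    push_cast
    rw [show (2:ℚ) ^ ((-(52 - f)).toNat) = (2:ℚ) ^ (-((52:ℤ) - f)) by
      rw [← zpow_natCast, Int.toNat_of_nonneg (by omega : (0:ℤ) ≤ -(52 - f))]]
    rw [zpow_neg]
    have hne : (2:ℚ) ^ ((52:ℤ) - f) ≠ 0 := zpow_ne_zero _ (by norm_num)
    field_simp

-- the denominator of A's shifted pair is positive
theorem pv_D_pos (b : Nat) (f : Int) (hb : 0 < b) :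
    0 < (if 0 ≤ 52 - f then b else b <<< (-(52 - f)).toNat) := by
  split_ifs
  · exact hb
  · rw [Nat.shiftLeft_eq]
    exact Nat.mul_pos hb (Nat.two_pow_pos _)

-- A's normalization test, rationally (nonnegative shift)
theorem pv_cond_pos (a b : Nat) (f0 : Int) (hb0 : (0:ℚ) < b) (hf : 0 ≤ f0) :
    (a < b <<< f0.toNat) ↔ (a:ℚ)/b < 2 ^ f0 := by
  rw [Nat.shiftLeft_eq, div_lt_iff₀ hb0]
  have h2 : (2:ℚ) ^ (f0.toNat) = (2:ℚ) ^ f0 := by rw [← zpow_natCast, Int.toNat_of_nonneg hf]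
  constructor
  · intro h
    have h' : (a:ℚ) < ((b * 2 ^ f0.toNat : ℕ):ℚ) := by exact_mod_cast h
    push_cast at h'; rw [h2] at h'; linarith
  · intro h
    have h' : (a:ℚ) < ((b * 2 ^ f0.toNat : ℕ):ℚ) := by push_cast; rw [h2]; linarith
    exact_mod_cast h'

-- A's normalization test, rationally (negative shift)
theorem pv_cond_neg (a b : Nat) (f0 : Int) (hb0 : (0:ℚ) < b) (hf : f0 < 0) :
    (a <<< (-f0).toNat < b) ↔ (a:ℚ)/b < 2 ^ f0 := by
  have h2 : (2:ℚ) ^ ((-f0).toNat) = (2:ℚ) ^ (-f0) := by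
    rw [← zpow_natCast, Int.toNat_of_nonneg (by omega : (0:ℤ) ≤ -f0)]
  have hpow : (0:ℚ) < (2:ℚ) ^ f0 := zpow_pos (by norm_num) _
  have key : ((a:ℚ) * 2 ^ (-f0) < b) ↔ (a:ℚ)/b < 2 ^ f0 := by
    rw [zpow_neg, ← div_eq_mul_inv, div_lt_iff₀ hpow, div_lt_iff₀ hb0,
      mul_comm ((2:ℚ) ^ f0) (b:ℚ)]
  rw [Nat.shiftLeft_eq, ← key]
  constructor
  · intro h
    have h' : ((a * 2 ^ (-f0).toNat : ℕ):ℚ) < b := by exact_mod_cast h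
    push_cast at h'; rw [h2] at h'; linarith
  · intro h
    have h' : ((a * 2 ^ (-f0).toNat : ℕ):ℚ) < ((b:ℕ):ℚ) := by push_cast; rw [h2]; linarith
    exact_mod_cast h'

-- A's division double (mantissa, exponent) has exactly the value of B's rational rounding
theorem pv_divDouble_val (a b : Nat) (hb : 0 < b) :
    ((pvDivDouble a b).1 : ℚ) * 2 ^ (pvDivDouble a b).2 = dblRoundQ ((a : ℚ) / b) := by
  by_cases ha : a = 0
  · subst ha; simp [pvDivDouble, dblRoundQ]
  have ha0 : (0:ℚ) < a := by exact_mod_cast Nat.pos_of_ne_zero ha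
  have hb0 : (0:ℚ) < b := by exact_mod_cast hb
  have hx0 : (0:ℚ) < (a:ℚ)/b := by positivity
  obtain ⟨hA1, hA2, hA3⟩ := pv_bitLen_bounds a ha
  obtain ⟨hB1, hB2, hB3⟩ := pv_bitLen_bounds b (by omega)
  have hqA1 : (2:ℚ) ^ ((pvBitLen a : ℤ) - 1) ≤ a := by
    have := (Nat.cast_le (α := ℚ)).mpr hA1
    rw [pv_npow_cast] at this
    rwa [show ((pvBitLen a - 1 : ℕ) : ℤ) = (pvBitLen a : ℤ) - 1 by omega] at this
  have hqA2 : (a:ℚ) < 2 ^ (pvBitLen a : ℤ) := by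
    have := (Nat.cast_lt (α := ℚ)).mpr hA2
    rwa [pv_npow_cast] at this
  have hqB1 : (2:ℚ) ^ ((pvBitLen b : ℤ) - 1) ≤ b := by
    have := (Nat.cast_le (α := ℚ)).mpr hB1
    rw [pv_npow_cast] at this
    rwa [show ((pvBitLen b - 1 : ℕ) : ℤ) = (pvBitLen b : ℤ) - 1 by omega] at this
  have hqB2 : (b:ℚ) < 2 ^ (pvBitLen b : ℤ) := by
    have := (Nat.cast_lt (α := ℚ)).mpr hB2
    rwa [pv_npow_cast] at this
  simp only [pvDivDouble, if_neg ha]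
  set f0 : ℤ := (pvBitLen a : ℤ) - (pvBitLen b : ℤ) with hf0def
  have hlow : (2:ℚ) ^ (f0 - 1) < (a:ℚ)/b := by
    have e1 : (2:ℚ) ^ (f0 - 1) = (2:ℚ) ^ ((pvBitLen a : ℤ) - 1) / 2 ^ (pvBitLen b : ℤ) := by
      rw [← zpow_sub₀ (by norm_num : (2:ℚ) ≠ 0)]; congr 1; omega
    rw [e1]
    calc (2:ℚ) ^ ((pvBitLen a : ℤ) - 1) / 2 ^ (pvBitLen b : ℤ)
        < (2:ℚ) ^ ((pvBitLen a : ℤ) - 1) / b :=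
          div_lt_div_of_pos_left (by positivity) hb0 hqB2
      _ ≤ (a:ℚ)/b := by gcongr
  have hhigh : (a:ℚ)/b < 2 ^ (f0 + 1) := by
    have e1 : (2:ℚ) ^ (f0 + 1) = (2:ℚ) ^ (pvBitLen a : ℤ) / 2 ^ ((pvBitLen b : ℤ) - 1) := by
      rw [← zpow_sub₀ (by norm_num : (2:ℚ) ≠ 0)]; congr 1; omega
    rw [e1]
    calc (a:ℚ)/b < (2:ℚ) ^ (pvBitLen a : ℤ) / b := by gcongr
      _ ≤ (2:ℚ) ^ (pvBitLen a : ℤ) / 2 ^ ((pvBitLen b : ℤ) - 1) := by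
          gcongr
  by_cases hf : 0 ≤ f0
  · rw [if_pos hf]
    by_cases hc : a < b <<< f0.toNat
    · rw [if_pos hc]
      have hcr : (a:ℚ)/b < 2 ^ f0 := (pv_cond_pos a b f0 hb0 hf).mp hc
      exact pv_core a b _ _ (f0 - 1) ha hb (pv_D_pos b (f0 - 1) hb) (pv_shift_val a b (f0 - 1) hb)
        (pv_log_eq _ _ hx0 (le_of_lt hlow) (by rwa [sub_add_cancel]))
    · rw [if_neg hc]
      have hcr : 2 ^ f0 ≤ (a:ℚ)/b :=
        le_of_not_gt (fun h => hc ((pv_cond_pos a b f0 hb0 hf).mpr h))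
      exact pv_core a b _ _ f0 ha hb (pv_D_pos b f0 hb) (pv_shift_val a b f0 hb)
        (pv_log_eq _ _ hx0 hcr hhigh)
  · rw [if_neg hf]
    by_cases hc : a <<< (-f0).toNat < b
    · rw [if_pos hc]
      have hcr : (a:ℚ)/b < 2 ^ f0 := (pv_cond_neg a b f0 hb0 (by omega)).mp hc
      exact pv_core a b _ _ (f0 - 1) ha hb (pv_D_pos b (f0 - 1) hb) (pv_shift_val a b (f0 - 1) hb)
        (pv_log_eq _ _ hx0 (le_of_lt hlow) (by rwa [sub_add_cancel]))
    · rw [if_neg hc]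
      have hcr : 2 ^ f0 ≤ (a:ℚ)/b :=
        le_of_not_gt (fun h => hc ((pv_cond_neg a b f0 hb0 (by omega)).mpr h))
      exact pv_core a b _ _ f0 ha hb (pv_D_pos b f0 hb) (pv_shift_val a b f0 hb)
        (pv_log_eq _ _ hx0 hcr hhigh)

-- same for the ×100 step
theorem pv_mul100_val (m : Nat) (e : Int) :
    ((pvMul100 m e).1 : ℚ) * 2 ^ (pvMul100 m e).2 = dblRoundQ (100 * ((m : ℚ) * 2 ^ e)) := by
  by_cases hm : m = 0
  · subst hm; simp [pvMul100, pvBitLen, dblRoundQ]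
  have hM : 100 * m ≠ 0 := by positivity
  obtain ⟨h1, h2, h3⟩ := pv_bitLen_bounds (100 * m) hM
  have hq1 : (2:ℚ) ^ ((pvBitLen (100 * m) : ℤ) - 1) ≤ ((100 * m : ℕ):ℚ) := by
    have := (Nat.cast_le (α := ℚ)).mpr h1
    rw [pv_npow_cast] at this
    rwa [show ((pvBitLen (100 * m) - 1 : ℕ) : ℤ) = (pvBitLen (100 * m) : ℤ) - 1 by omega] at this
  have hq2 : ((100 * m : ℕ):ℚ) < 2 ^ (pvBitLen (100 * m) : ℤ) := by
    have := (Nat.cast_lt (α := ℚ)).mpr h2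
    rwa [pv_npow_cast] at this
  have hMq : (0:ℚ) < ((100 * m : ℕ):ℚ) := by exact_mod_cast Nat.pos_of_ne_zero hM
  have hx : 100 * ((m:ℚ) * 2 ^ e) = ((100 * m : ℕ):ℚ) * 2 ^ e := by push_cast; ring
  have hxpos : (0:ℚ) < ((100 * m : ℕ):ℚ) * 2 ^ e := by positivity
  set l := pvBitLen (100 * m) with hl
  have hlog : Int.log 2 (((100 * m : ℕ):ℚ) * 2 ^ e) = (l:ℤ) - 1 + e := by
    apply pv_log_eq _ _ hxpos
    · rw [zpow_add₀ (by norm_num : (2:ℚ) ≠ 0)]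
      exact mul_le_mul_of_nonneg_right hq1 (le_of_lt (zpow_pos (by norm_num) _))
    · rw [show (l:ℤ) - 1 + e + 1 = (l:ℤ) + e by ring, zpow_add₀ (by norm_num : (2:ℚ) ≠ 0)]
      exact mul_lt_mul_of_pos_right hq2 (zpow_pos (by norm_num) _)
  rw [hx]
  unfold dblRoundQ
  rw [if_neg (ne_of_gt hxpos)]
  simp only [hlog]
  have hred : ((100 * m : ℕ):ℚ) * 2 ^ e * 2 ^ (52 - ((l:ℤ) - 1 + e))
      = ((100 * m : ℕ):ℚ) * 2 ^ ((53:ℤ) - l) := by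
    rw [mul_assoc, ← zpow_add₀ (by norm_num : (2:ℚ) ≠ 0)]
    congr 2
    ring
  rw [hred]
  unfold pvMul100
  simp only [← hl]
  by_cases hle : l ≤ 53
  · rw [if_pos hle]
    have hcast : ((100 * m : ℕ):ℚ) * 2 ^ ((53:ℤ) - l) = (((100 * m * 2 ^ (53 - l) : ℕ) : ℤ):ℚ) := by
      rw [show ((53:ℤ) - l) = ((53 - l : ℕ):ℤ) by omega, zpow_natCast]
      push_cast; ring
    rw [hcast, pv_rheQ_intCast]
    push_cast
    rw [← zpow_natCast (2:ℚ) (53 - l),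
      show ((53 - l : ℕ) : ℤ) = (53:ℤ) - l from by omega,
      mul_assoc (100 * (m:ℚ)) ((2:ℚ) ^ ((53:ℤ) - l)) ((2:ℚ) ^ ((l:ℤ) - 1 + e - 52)),
      show (2:ℚ) ^ ((53:ℤ) - l) * 2 ^ ((l:ℤ) - 1 + e - 52) = 2 ^ e from by
        rw [← zpow_add₀ (by norm_num : (2:ℚ) ≠ 0)]; congr 1; ring]
  · rw [if_neg hle]
    have hdp : (0:ℕ) < 2 ^ (l - 53) := Nat.two_pow_pos _
    have hdiv : ((100 * m : ℕ):ℚ) * 2 ^ ((53:ℤ) - l) = ((100 * m : ℕ):ℚ) / ((2 ^ (l - 53) : ℕ):ℚ) := by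
      rw [pv_npow_cast, div_eq_mul_inv, ← zpow_neg]
      congr 2
      omega
    rw [hdiv, pv_rheQ_div (100 * m) (2 ^ (l - 53)) hdp, Nat.shiftRight_eq_div_pow]
    push_cast
    congr 2
    omega

-- '%.0f' of a (mantissa, exponent) value is half-even rounding of the rational
theorem pv_fmt0_val (m : Nat) (e : Int) :
    (pvFmt0 m e : ℤ) = rheQ ((m : ℚ) * 2 ^ e) := by
  unfold pvFmt0
  by_cases he : 0 ≤ e
  · rw [if_pos he, Nat.shiftLeft_eq]
    have hcast : (m:ℚ) * 2 ^ e = (((m * 2 ^ e.toNat : ℕ) : ℤ):ℚ) := by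
      push_cast
      rw [← zpow_natCast (2:ℚ) e.toNat, Int.toNat_of_nonneg he]
    rw [hcast, pv_rheQ_intCast]
  · rw [if_neg he]
    have hd : (0:ℕ) < 2 ^ ((-e).toNat) := Nat.two_pow_pos _
    have h2 : (((2 ^ ((-e).toNat) : ℕ)):ℚ) = (2:ℚ) ^ (-e) := by
      rw [pv_npow_cast, Int.toNat_of_nonneg (by omega : (0:ℤ) ≤ -e)]
    have hcast : (m:ℚ) * 2 ^ e = (m:ℚ) / (((2 ^ ((-e).toNat) : ℕ)):ℚ) := by
      rw [h2, div_eq_mul_inv, ← zpow_neg, neg_neg]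
    rw [hcast, pv_rheQ_div m _ hd, Nat.shiftRight_eq_div_pow]

-- the 0.3 comparison of a (mantissa, exponent) value
theorem pv_gt03_val (m : Nat) (e : Int) :
    pvGt03 false m e = decide (pvC03 < (m : ℚ) * 2 ^ e) := by
  unfold pvGt03 pvC03
  simp only [Bool.false_eq_true, if_false]
  have h54 : (0:ℚ) < (2:ℚ) ^ (54:ℕ) := by positivity
  by_cases he : -54 ≤ e
  · rw [if_pos he]
    simp only [decide_eq_decide]
    rw [Nat.shiftLeft_eq, div_lt_iff₀ h54]
    have hpow : ((2 ^ (e + 54).toNat : ℕ):ℚ) = (2:ℚ) ^ (e + 54) := by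
      rw [pv_npow_cast, Int.toNat_of_nonneg (by omega : (0:ℤ) ≤ e + 54)]
    have hval : (m:ℚ) * 2 ^ e * 2 ^ (54:ℕ) = ((m * 2 ^ (e + 54).toNat : ℕ):ℚ) := by
      push_cast [hpow]
      rw [← zpow_natCast (2:ℚ) 54, mul_assoc, ← zpow_add₀ (by norm_num : (2:ℚ) ≠ 0)]
      norm_num
    rw [hval]
    exact_mod_cast Iff.rfl
  · rw [if_neg he]
    simp only [decide_eq_decide]
    rw [Nat.shiftLeft_eq, div_lt_iff₀ h54]
    have hpow : ((2 ^ (-54 - e).toNat : ℕ):ℚ) = (2:ℚ) ^ (-(e + 54)) := by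
      rw [pv_npow_cast, Int.toNat_of_nonneg (by omega : (0:ℤ) ≤ -54 - e)]
      congr 1
      ring
    have hkey : ((5404319552844595:ℚ) * 2 ^ (-(e + 54)) < (m:ℚ)) ↔
        (5404319552844595:ℚ) < (m:ℚ) * 2 ^ (e + 54) := by
      rw [zpow_neg, mul_inv_lt_iff₀ (zpow_pos (by norm_num : (0:ℚ) < 2) (e + 54))]
    have hshape : (m:ℚ) * 2 ^ e * 2 ^ (54:ℕ) = (m:ℚ) * 2 ^ (e + 54) := by
      rw [← zpow_natCast (2:ℚ) 54, mul_assoc, ← zpow_add₀ (by norm_num : (2:ℚ) ≠ 0)]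
      norm_num
    rw [hshape]
    constructor
    · intro h
      have h' : ((5404319552844595 * 2 ^ (-54 - e).toNat : ℕ):ℚ) < (m:ℚ) := by exact_mod_cast h
      push_cast [hpow] at h'
      exact hkey.mp h'
    · intro h
      have h' := hkey.mpr h
      have h'' : ((5404319552844595 * 2 ^ (-54 - e).toNat : ℕ):ℚ) < ((m:ℕ):ℚ) := by
        push_cast [hpow]
        exact h'
      exact_mod_cast h''

theorem pv_pos_val (m : Nat) (e : Int) : (0 < (m : ℚ) * 2 ^ e) ↔ 0 < m := by
  rw [mul_pos_iff_of_pos_right (zpow_pos (by norm_num) e)]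
  exact_mod_cast Nat.cast_pos (α := ℚ)

theorem pv_c03_pos : 0 < pvC03 := by
  unfold pvC03; positivity

-- per-color agreement of the two rate models
theorem pv_rate_eq (changes tries : Int) :
    (pvRateInfo changes tries).1 = decide (pvC03 < (pvRateQ changes tries).1) ∧
    (pvRateInfo changes tries).2.1 = decide (0 < (pvRateQ changes tries).1) ∧
    (pvRateInfo changes tries).2.2 = (pvRateQ changes tries).2 := by
  have ht : 0 < (max tries 1).toNat := by
    have := le_max_right tries 1
    omega
  unfold pvRateInfo pvRateQ
  simp only []
  have hval : ((pvDivDouble changes.natAbs (max tries 1).toNat).1 : ℚ)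
      * 2 ^ (pvDivDouble changes.natAbs (max tries 1).toNat).2
      = dblRoundQ ((changes.natAbs : ℚ) / ((max tries 1).toNat : ℚ)) :=
    pv_divDouble_val _ _ ht
  set me := pvDivDouble changes.natAbs (max tries 1).toNat with hmedef
  set mag := dblRoundQ ((changes.natAbs : ℚ) / ((max tries 1).toNat : ℚ)) with hmagdef
  have hmag0 : 0 ≤ mag := by rw [← hval]; positivity
  have hnum : ((pvFmt0 (pvMul100 me.1 me.2).1 (pvMul100 me.1 me.2).2 : ℕ) : ℤ)
      = rheQ (dblRoundQ (100 * mag)) := by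
    rw [← hval, ← pv_mul100_val me.1 me.2]
    exact pv_fmt0_val _ _
  by_cases hs : changes < 0
  · refine ⟨?_, ?_, ?_⟩
    · have hb : ¬ pvC03 < -mag := not_lt.mpr (le_trans (by linarith) (le_of_lt pv_c03_pos))
      simp [pvGt03, hs, hb]
    · have hb : ¬ (0:ℚ) < -mag := by linarith
      simp [hs, hb]
    · simp [hs, hnum]
  · refine ⟨?_, ?_, ?_⟩
    · have h1 : pvGt03 false me.1 me.2 = decide (pvC03 < mag) := by
        rw [pv_gt03_val, hval]
      simp [hs, h1]
    · have h2 : (0 < mag) ↔ 0 < me.1 := by rw [← hval]; exact pv_pos_val _ _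
      have h2' : decide (0 < me.1) = decide (0 < mag) := decide_eq_decide.mpr h2.symm
      simp [hs, h2']
    · simp [hs, hnum]

-- the two color_name implementations agree
theorem pv_colorName_eq (c : Int) : pvColorName c = pvColorNameB c := by
  by_cases h : 0 ≤ c ∧ c < 16
  · obtain ⟨h1, h2⟩ := h
    interval_cases c <;> rfl
  · unfold pvColorName pvColorNameB
    rw [if_neg (by simpa [pvNamesB] using h)]
    have hnone : pvColorNames.get? c = none := by
      have h' : c < 0 ∨ 16 ≤ c := by omega
      have hitems : pvColorNames.items = [((0:Int), "black"), (1, "blue"), (2, "red"),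
        (3, "green"), (4, "yellow"), (5, "gray"), (6, "magenta"), (7, "orange"), (8, "cyan"),
        (9, "brown"), (10, "pink"), (11, "maroon"), (12, "olive"), (13, "navy"), (14, "teal"),
        (15, "white")] := by rfl
      have e0 : ((0:Int) == c) = false := by simp; omega
      have e1 : ((1:Int) == c) = false := by simp; omega
      have e2 : ((2:Int) == c) = false := by simp; omega
      have e3 : ((3:Int) == c) = false := by simp; omega
      have e4 : ((4:Int) == c) = false := by simp; omega
      have e5 : ((5:Int) == c) = false := by simp; omega
      have e6 : ((6:Int) == c) = false := by simp; omega
      have e7 : ((7:Int) == c) = false := by simp; omega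
      have e8 : ((8:Int) == c) = false := by simp; omega
      have e9 : ((9:Int) == c) = false := by simp; omega
      have e10 : ((10:Int) == c) = false := by simp; omega
      have e11 : ((11:Int) == c) = false := by simp; omega
      have e12 : ((12:Int) == c) = false := by simp; omega
      have e13 : ((13:Int) == c) = false := by simp; omega
      have e14 : ((14:Int) == c) = false := by simp; omega
      have e15 : ((15:Int) == c) = false := by simp; omega
      simp only [PySem.Dict.get?, hitems, List.find?_cons, e0, e1, e2, e3, e4, e5, e6, e7, e8, e9, e10, e11, e12, e13, e14, e15, List.find?_nil]
      rfl
    rw [hnone]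
    rfl

-- A's three-accumulator fold over the colors equals B's three filters of the row table
theorem pv_fold_eq_filters (row : Int → ℚ × String) (ks : List Int) (e n i : List String) :
    ks.foldl
      (fun (acc : List String × List String × List String) color =>
        let r := row color
        if decide (pvC03 < r.1) then (acc.1 ++ [r.2], acc.2.1, acc.2.2)
        else if decide (0 < r.1) then (acc.1, acc.2.1 ++ [r.2], acc.2.2)
        else (acc.1, acc.2.1, acc.2.2 ++ [r.2])) (e, n, i)
    = (e ++ ((ks.map row).filter (fun r => decide (pvC03 < r.1))).map (·.2),
       n ++ ((ks.map row).filter (fun r => decide (0 < r.1) && decide (r.1 ≤ pvC03))).map (·.2),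
       i ++ ((ks.map row).filter (fun r => !decide (0 < r.1))).map (·.2)) := by
  induction ks generalizing e n i with
  | nil => simp
  | cons k ks ih =>
    simp only [List.foldl_cons, List.map_cons, List.filter_cons]
    by_cases h1 : pvC03 < (row k).1
    · have h2 : 0 < (row k).1 := lt_trans pv_c03_pos h1
      have h3 : ¬ (row k).1 ≤ pvC03 := not_le.mpr h1
      rw [if_pos (decide_eq_true h1), ih]
      simp [h1, h2, h3]
    · by_cases h2 : 0 < (row k).1
      · have h3 : (row k).1 ≤ pvC03 := not_lt.mp h1
        rw [if_neg (by simpa using h1), if_pos (decide_eq_true h2), ih]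
        simp [h1, h2, h3]
      · rw [if_neg (by simpa using h1), if_neg (by simpa using h2), ih]
        simp [h1, h2]

theorem color_effectiveness_summary_spec_aux (color_tries color_changes : List (Int × Int)) :
    color_effectiveness_summary color_tries color_changes
      = color_effectiveness_summary_alt color_tries color_changes := by
  unfold color_effectiveness_summary color_effectiveness_summary_alt
  set ct := PySem.Dict.ofList color_tries with hct
  set cc := PySem.Dict.ofList color_changes with hcc
  by_cases hemp : ct.items.isEmpty
  · simp [hemp]
  · simp only [hemp, Bool.false_eq_true, if_false]
    set ks := PySem.List.sorted ct.keys (fun x => x) false with hks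
    have hstep :
        (fun (acc : List String × List String × List String) (color : Int) =>
          let tries := ct.getD color 0
          let changes := cc.getD color 0
          let r := pvRateInfo changes tries
          let entry := pvColorName color ++ "(" ++ PySem.Int.toStr changes ++ "/" ++
                       PySem.Int.toStr tries ++ "=" ++ r.2.2 ++ ")"
          if r.1 then (acc.1 ++ [entry], acc.2.1, acc.2.2)
          else if r.2.1 then (acc.1, acc.2.1 ++ [entry], acc.2.2)
          else (acc.1, acc.2.1, acc.2.2 ++ [entry]))
        = (fun (acc : List String × List String × List String) (color : Int) =>
          let r := pvRowB ct cc color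
          if decide (pvC03 < r.1) then (acc.1 ++ [r.2], acc.2.1, acc.2.2)
          else if decide (0 < r.1) then (acc.1, acc.2.1 ++ [r.2], acc.2.2)
          else (acc.1, acc.2.1, acc.2.2 ++ [r.2])) := by
      funext acc color
      obtain ⟨e1, e2, e3⟩ := pv_rate_eq (cc.getD color 0) (ct.getD color 0)
      simp only [pvRowB, pv_colorName_eq, e1, e2, e3]
      rfl
    rw [hstep, pv_fold_eq_filters (pvRowB ct cc) ks]
    set rows := ks.map (pvRowB ct cc) with hrows
    have hne : rows ≠ [] := by
      have hperm := PySem.List.sorted_perm ct.keys (fun x : Int => x) false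
      have hksne : ks ≠ [] := by
        intro h
        apply hemp
        have hlen := hperm.length_eq
        rw [← hks, h] at hlen
        simp only [PySem.Dict.keys, List.length_map, List.length_nil] at hlen
        rw [List.isEmpty_iff, ← List.length_eq_zero_iff]
        omega
      simpa [hrows] using hksne
    simp only [pvSectionsB, List.filterMap_cons, List.filterMap_nil]
    by_cases h1 : rows.filter (fun r => decide (pvC03 < r.1)) = []
    · by_cases h2 : rows.filter (fun r => decide (0 < r.1) && decide (r.1 ≤ pvC03)) = []
      · by_cases h3 : rows.filter (fun r => !decide (0 < r.1)) = []
        · exfalso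
          rcases hrows2 : rows with _ | ⟨r, rest⟩
          · exact hne hrows2
          · have m1 := List.filter_eq_nil_iff.mp h1 r (by rw [hrows2]; simp)
            have m2 := List.filter_eq_nil_iff.mp h2 r (by rw [hrows2]; simp)
            have m3 := List.filter_eq_nil_iff.mp h3 r (by rw [hrows2]; simp)
            simp at m1 m2 m3
            have := m2 m3
            linarith
        · simp [h1, h2, h3, List.isEmpty_iff]
      · by_cases h3 : rows.filter (fun r => !decide (0 < r.1)) = []
        · simp [h1, h2, h3, List.isEmpty_iff]
        · simp [h1, h2, h3, List.isEmpty_iff]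
    · by_cases h2 : rows.filter (fun r => decide (0 < r.1) && decide (r.1 ≤ pvC03)) = []
      · by_cases h3 : rows.filter (fun r => !decide (0 < r.1)) = [] <;>
          simp [h1, h2, h3, List.isEmpty_iff]
      · by_cases h3 : rows.filter (fun r => !decide (0 < r.1)) = [] <;>
          simp [h1, h2, h3, List.isEmpty_iff]

-- ===== VERDICT (by name: the statement is the Claim_ definition above) =====
theorem color_effectiveness_summary_spec : Claim_equal_color_effectiveness_summary := by
  intro ct cc _
  exact color_effectiveness_summary_spec_aux ct cc
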